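-- pv_equiv track=rewrite | github.com/BeskrovnaiaM/BREXloc_project_2024 | src/loci_counter.py | reverse_proteins
-- ===== SOURCE A (Python) =====
-- def reverse_proteins(line):
--     proteins = line.strip().split(',')
--     inner_index = None
--     brex_index = None
--     for i, protein in enumerate(proteins):
--         if protein.endswith('_inner') or protein.endswith('_brex'):
--             inner_index = i
--             brex_index = i
--             break
--     if inner_index is not None:
--         downstream_index = None
--         for i, protein in enumerate(proteins):
--             if protein.endswith('_downstream'):
--                 downstream_index = i
--                 break
--         if downstream_index is not None and downstream_index < inner_index:
--             reversed_proteins = proteins[::-1]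
--             return ','.join(reversed_proteins)
--     return line.strip()
-- ===== SOURCE B (Python) =====
-- def reverse_proteins(line):
--     stripped = line.strip()
--     proteins = stripped.split(',')
--     first_marker = None
--     first_down = None
--     for i, p in enumerate(proteins):
--         if p.endswith('_inner') or p.endswith('_brex'):
--             first_marker = i
--         if first_down is None and p.endswith('_downstream'):
--             first_down = i
--         if first_marker is not None:
--             break  # nothing past the first marker can matter
--     if first_marker is not None and first_down is not None and first_down < first_marker:
--         return ','.join(proteins[::-1])
--     return stripped
-- ===== Notes on version B (the rewrite author's own statement) =====
-- stated objective: alternative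
-- what changed: Replaces A's two separate full scans (one for the first _inner/_brex marker, one for the first _downstream) by a single combined left-to-right scan that records both first indices at once and stops as soon as a marker is seen.
import Mathlib
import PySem

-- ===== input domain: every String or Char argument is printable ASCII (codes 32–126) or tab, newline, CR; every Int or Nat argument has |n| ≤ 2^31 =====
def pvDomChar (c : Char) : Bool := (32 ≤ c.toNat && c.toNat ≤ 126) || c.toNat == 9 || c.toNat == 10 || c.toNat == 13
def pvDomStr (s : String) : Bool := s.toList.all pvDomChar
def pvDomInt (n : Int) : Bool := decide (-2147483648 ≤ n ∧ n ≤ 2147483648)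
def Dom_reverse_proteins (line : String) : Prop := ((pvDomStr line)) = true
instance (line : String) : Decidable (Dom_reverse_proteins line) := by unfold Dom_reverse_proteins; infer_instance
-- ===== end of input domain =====

-- B replaces A's two separate scans by one combined scan with early exit; objective: alternative decomposition, same cost.

-- ===== PORT A =====
-- first loop of A: first index whose element ends with '_inner' or '_brex' (break)
def aFindMarker : List String → Int → Option Int
  | [], _ => none
  | p :: ps, i =>
    if PySem.Str.endswith p "_inner" || PySem.Str.endswith p "_brex" then some i
    else aFindMarker ps (i + 1)

-- second loop of A: first index whose element ends with '_downstream' (break)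
def aFindDown : List String → Int → Option Int
  | [], _ => none
  | p :: ps, i =>
    if PySem.Str.endswith p "_downstream" then some i
    else aFindDown ps (i + 1)

def reverse_proteins (line : String) : String :=
  let proteins := (PySem.Str.split? (PySem.Str.strip line) ",").getD []
  match aFindMarker proteins 0 with
  | none => PySem.Str.strip line
  | some inner_index =>
    match aFindDown proteins 0 with
    | some downstream_index =>
      if downstream_index < inner_index then
        -- proteins[::-1] = proteins.reverse (exact: PySem.List.slice?_none_none_neg_one)
        PySem.Str.join "," proteins.reverse
      else PySem.Str.strip line
    | none => PySem.Str.strip line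

-- ===== PORT B =====
-- B's single loop: carry (first_marker, first_down), set each once, break at the first marker
def bScan : List String → Int → Option Int → Option Int × Option Int
  | [], _, fd => (none, fd)
  | p :: ps, i, fd =>
    let fm : Option Int :=
      if PySem.Str.endswith p "_inner" || PySem.Str.endswith p "_brex" then some i else none
    let fd' : Option Int :=
      if fd = none ∧ PySem.Str.endswith p "_downstream" then some i else fd
    if fm.isSome then (fm, fd') else bScan ps (i + 1) fd'

def reverse_proteins_alt (line : String) : String :=
  let stripped := PySem.Str.strip line
  let proteins := (PySem.Str.split? stripped ",").getD []
  match bScan proteins 0 none with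
  | (some m, some d) =>
    if d < m then PySem.Str.join "," proteins.reverse else stripped
  | _ => stripped

-- ===== PRECONDITION & SPEC =====
def Spec_reverse_proteins (line : String) (out : String) : Prop := out = reverse_proteins_alt line
instance (line : String) (out : String) : Decidable (Spec_reverse_proteins line out) := by unfold Spec_reverse_proteins; infer_instance

-- ===== CLAIM (what is proved, stated in full; the proofs are below) =====
def Claim_equal_reverse_proteins : Prop := ∀ (line : String), Dom_reverse_proteins line → Spec_reverse_proteins line (reverse_proteins line)

-- ===== LEMMAS AND PROOFS =====

lemma aFindDown_ge : ∀ (l : List String) (j d : Int), aFindDown l j = some d → j ≤ d := by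
  intro l
  induction l with
  | nil => intro j d h; simp [aFindDown] at h
  | cons p ps ih =>
    intro j d h
    unfold aFindDown at h
    split at h
    · injection h with h; omega
    · have := ih (j + 1) d h; omega

/-- B's combined scan decides the reversal exactly as A's two scans do. -/
lemma scan_dec : ∀ (l : List String) (i : Int) (fd : Option Int),
    (match bScan l i fd with
     | (some m, some d) => decide (d < m)
     | _ => false)
    = (match aFindMarker l i, (match fd with | some d => some d | none => aFindDown l i) with
       | some m, some d => decide (d < m)
       | _, _ => false) := by
  intro l
  induction l with
  | nil =>
    intro i fd
    cases fd <;> simp [bScan, aFindMarker]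
  | cons p ps ih =>
    intro i fd
    cases h1 : PySem.Str.endswith p "_inner" <;>
      cases h2 : PySem.Str.endswith p "_brex" <;>
      cases h3 : PySem.Str.endswith p "_downstream" <;>
      cases fd with
    | _ =>
      first
      | -- no marker at the head: both sides recurse; the carried fd is A's first-down choice
        (simp only [bScan, aFindMarker, aFindDown, h1, h2, h3, Bool.or_self, Bool.false_or,
           Bool.or_false, if_false, if_true, Bool.false_eq_true, if_neg, reduceIte]
         first
         | exact ih (i + 1) _
         | simpa using ih (i + 1) _
         | (simp; first | exact ih (i + 1) _ | simpa using ih (i + 1) _))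
      | -- marker at the head, no downstream seen by B; A may find one later, at an index > i
        (simp only [bScan, aFindMarker, aFindDown, h1, h2, h3]
         simp
         cases h : aFindDown ps (i + 1) with
         | none => simp
         | some d =>
           have := aFindDown_ge ps (i + 1) d h
           simp
           omega)

-- ===== VERDICT (by name: the statement is the Claim_ definition above) =====
theorem reverse_proteins_spec : Claim_equal_reverse_proteins := by
  intro line _
  unfold Spec_reverse_proteins reverse_proteins reverse_proteins_alt
  have h := scan_dec ((PySem.Str.split? (PySem.Str.strip line) ",").getD []) 0 none
  simp only [] at h ⊢
  set l := (PySem.Str.split? (PySem.Str.strip line) ",").getD [] with hl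
  rcases hb : bScan l 0 none with ⟨fm, fd⟩
  rw [hb] at h
  cases hA : aFindMarker l 0 with
  | none =>
    rw [hA] at h
    cases fm with
    | none => rfl
    | some m =>
      cases fd with
      | none => rfl
      | some d =>
        simp at h
        simp [h]
  | some m' =>
    rw [hA] at h
    cases hD : aFindDown l 0 with
    | none =>
      rw [hD] at h
      cases fm with
      | none => rfl
      | some m =>
        cases fd with
        | none => rfl
        | some d => simp at h; simp [h]
    | some d' =>
      rw [hD] at h
      cases fm with
      | none =>
        simp at h
        simp [not_lt.mpr h]
      | some m =>
        cases fd with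
        | none =>
          simp at h
          simp [not_lt.mpr h]
        | some d =>
          simp at h
          by_cases hlt : d < m
          · simp [hlt, h.mp hlt]
          · have hn : ¬ d' < m' := fun hc => hlt (h.mpr hc)
            simp [hlt, hn]
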